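-- pv_equiv track=rewrite | github.com/ganyuanyuan/s-expression-calculator | expr.py | count_subexpr_length
-- ===== SOURCE A (Python) =====
-- def count_subexpr_length(expr_list, i):
--     j = i+1
--     if expr_list[i] == '(':
--         count = 1
--         while count!= 0 and j<len(expr_list):
--             if expr_list[j] == ')':
--                 count -= 1
--             if expr_list[j] == '(':
--                 count += 1
--             j += 1
--     return j-i
-- ===== SOURCE B (Python) =====
-- def count_subexpr_length(expr_list, i):
--     # Recursive structural descent: each inner element (token or nested
--     # subexpression) is consumed by a recursive call instead of a bracket counter.
--     if expr_list[i] != '(':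
--         return 1
--     p = i + 1
--     while p < len(expr_list) and expr_list[p] != ')':
--         p += count_subexpr_length(expr_list, p)
--     if p < len(expr_list):
--         return p + 1 - i
--     return p - i
-- ===== Notes on version B (the rewrite author's own statement) =====
-- stated objective: alternative
-- what changed: Replaces the flat bracket-depth counter scan with recursive structural descent: the loop consumes each inner element via a recursive call and closes on the first ')' seen at this level.
import Mathlib
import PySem

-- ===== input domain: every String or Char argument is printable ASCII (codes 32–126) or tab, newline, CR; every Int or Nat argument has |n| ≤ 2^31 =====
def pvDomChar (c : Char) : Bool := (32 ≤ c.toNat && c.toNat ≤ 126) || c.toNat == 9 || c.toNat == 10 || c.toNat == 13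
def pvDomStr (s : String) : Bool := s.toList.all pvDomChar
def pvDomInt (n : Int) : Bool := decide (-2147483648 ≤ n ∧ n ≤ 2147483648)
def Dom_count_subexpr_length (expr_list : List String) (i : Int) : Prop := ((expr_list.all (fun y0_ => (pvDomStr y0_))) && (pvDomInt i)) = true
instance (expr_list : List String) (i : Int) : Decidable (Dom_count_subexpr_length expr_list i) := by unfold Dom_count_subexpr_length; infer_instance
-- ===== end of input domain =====

-- B replaces A's flat bracket-depth counter scan by recursive structural descent
-- over the nested s-expression (objective: alternative decomposition, same cost).

-- ===== PORT A =====
-- A's while loop; fuel = number of remaining iterations (the loop advances j by 1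
-- each pass and stops at len, so the fuel chosen below is exactly sufficient).
def aLoop (xs : List String) : Nat → Int → Int → Int
  | 0, _, j => j
  | f+1, count, j =>
    if count ≠ 0 ∧ j < (xs.length : Int) then
      let c1 := if PySem.List.pyGet? xs j = some ")" then count - 1 else count
      let c2 := if PySem.List.pyGet? xs j = some "(" then c1 + 1 else c1
      aLoop xs f c2 (j + 1)
    else j

def count_subexpr_length (expr_list : List String) (i : Int) : Int :=
  -- j starts at i+1; in the non-'(' branch it is unchanged, so the result is j - i = (i+1) - i
  match PySem.List.pyGet? expr_list i with
  | none => 0  -- expr_list[i] raises IndexError in Python; excluded by Pre_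
  | some t =>
    if t = "(" then
      aLoop expr_list ((expr_list.length : Int) - (i + 1)).toNat 1 (i + 1) - i
    else (i + 1) - i

-- ===== PORT B =====
-- B's mutual recursion (count_subexpr_length ↔ its while loop), fuel-bounded;
-- the top-level fuel below is proved sufficient on every input admitted by Pre_.
mutual
def bCount (xs : List String) : Nat → Int → Int
  | 0, _ => 1
  | f+1, i =>
    if PySem.List.pyGet? xs i ≠ some "(" then 1
    else
      let p := bLoop xs f (i + 1)
      if p < (xs.length : Int) then p + 1 - i else p - i
def bLoop (xs : List String) : Nat → Int → Int
  | 0, p => p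
  | f+1, p =>
    if p < (xs.length : Int) ∧ PySem.List.pyGet? xs p ≠ some ")" then
      bLoop xs f (p + bCount xs f p)
    else p
end

def count_subexpr_length_alt (expr_list : List String) (i : Int) : Int :=
  bCount expr_list (4 * expr_list.length + 2) i

-- ===== PRECONDITION & SPEC =====
-- Pre_ excludes exactly the inputs where expr_list[i] raises IndexError in both A and B.
def Pre_count_subexpr_length (expr_list : List String) (i : Int) : Prop :=
  PySem.Raise.InRange expr_list.length i
instance (expr_list : List String) (i : Int) : Decidable (Pre_count_subexpr_length expr_list i) := by unfold Pre_count_subexpr_length; infer_instance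

def pvWitness_count_subexpr_length : List String × Int := (["(", "+", "1", "(", "*", "2", "3", ")", ")"], 0)

def Spec_count_subexpr_length (expr_list : List String) (i : Int) (out : Int) : Prop := out = count_subexpr_length_alt expr_list i
instance (expr_list : List String) (i : Int) (out : Int) : Decidable (Spec_count_subexpr_length expr_list i out) := by unfold Spec_count_subexpr_length; infer_instance

-- ===== CLAIM (what is proved, stated in full; the proofs are below) =====
def Claim_equal_count_subexpr_length : Prop := ∀ (expr_list : List String) (i : Int), Dom_count_subexpr_length expr_list i → Pre_count_subexpr_length expr_list i → Spec_count_subexpr_length expr_list i (count_subexpr_length expr_list i)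

-- ===== LEMMAS AND PROOFS =====

theorem aLoop_exit (xs : List String) (f : Nat) (c j : Int)
    (h : ¬ (c ≠ 0 ∧ j < (xs.length : Int))) : aLoop xs f c j = j := by
  cases f <;> simp [aLoop, h]

theorem aLoop_mono (xs : List String) (f : Nat) : ∀ c j, j ≤ aLoop xs f c j := by
  induction f with
  | zero => intro c j; simp [aLoop]
  | succ f ih =>
    intro c j
    by_cases h : c ≠ 0 ∧ j < (xs.length : Int)
    · simp only [aLoop, if_pos h]
      have := ih (if PySem.List.pyGet? xs j = some "(" then (if PySem.List.pyGet? xs j = some ")" then c - 1 else c) + 1 else (if PySem.List.pyGet? xs j = some ")" then c - 1 else c)) (j + 1)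
      omega
    · simp [aLoop, h]

theorem aLoop_irrel (xs : List String) (f : Nat) : ∀ (f' : Nat) (c j : Int),
    ((xs.length : Int) - j).toNat ≤ f → ((xs.length : Int) - j).toNat ≤ f' →
    aLoop xs f c j = aLoop xs f' c j := by
  induction f with
  | zero =>
    intro f' c j h _
    have hj : (xs.length : Int) ≤ j := by omega
    rw [aLoop_exit xs 0 c j (by omega), aLoop_exit xs f' c j (by omega)]
  | succ f ih =>
    intro f' c j h h'
    by_cases hg : c ≠ 0 ∧ j < (xs.length : Int)
    · have hf' : ∃ f'', f' = f'' + 1 := by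
        rcases f' with _ | f''
        · exfalso; omega
        · exact ⟨f'', rfl⟩
      rcases hf' with ⟨f'', rfl⟩
      simp only [aLoop, if_pos hg]
      exact ih f'' _ (j + 1) (by omega) (by omega)
    · rw [aLoop_exit xs _ c j hg, aLoop_exit xs f' c j hg]

-- A's counter scan composes: running with count c+1 is running with count 1
-- to the point where the depth first drops, then continuing with count c.
theorem aLoop_compose (xs : List String) (n : Nat) : ∀ (j : Int) (fA : Nat) (c : Int),
    ((xs.length : Int) - j).toNat ≤ n → ((xs.length : Int) - j).toNat ≤ fA → 1 ≤ c →
    aLoop xs fA (c + 1) j =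
      aLoop xs ((xs.length : Int) - aLoop xs fA 1 j).toNat c (aLoop xs fA 1 j) := by
  induction n using Nat.strong_induction_on with
  | _ n ih =>
    intro j fA c hn hfA hc
    by_cases hj : j < (xs.length : Int)
    · have hn1 : 1 ≤ n := by omega
      rcases fA with _ | f
      · exfalso; omega
      by_cases hcl : PySem.List.pyGet? xs j = some ")"
      · have hop : ¬ PySem.List.pyGet? xs j = some "(" := by
          rw [hcl]; intro h; simp at h
        have he : aLoop xs (f+1) 1 j = j + 1 := by
          simp only [aLoop, if_pos (show (1:Int) ≠ 0 ∧ j < (xs.length:Int) from ⟨one_ne_zero, hj⟩), hcl, hop]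
          exact aLoop_exit xs f (1 - 1) (j + 1) (by omega)
        rw [he]
        simp only [aLoop, if_pos (show c + 1 ≠ 0 ∧ j < (xs.length:Int) from ⟨by omega, hj⟩), hcl, hop]
        simp only [Option.some.injEq, String.reduceEq, reduceIte, ite_true]
        rw [show c + 1 - 1 = c from by ring]
        exact aLoop_irrel xs f (((xs.length:Int) - (j+1)).toNat) c (j+1) (by omega) (le_refl _)
      · by_cases hopen : PySem.List.pyGet? xs j = some "("
        · -- '(' : depth rises; use the IH twice
          have hstep : ∀ (d : Int), aLoop xs (f+1) d j = aLoop xs f (d + 1) (j + 1) ∨ d = 0 := by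
            intro d
            by_cases hd : d = 0
            · right; exact hd
            · left
              simp only [aLoop, if_pos (show d ≠ 0 ∧ j < (xs.length:Int) from ⟨hd, hj⟩), hcl, hopen]
              simp
          have h1 : aLoop xs (f+1) 1 j = aLoop xs f 2 (j + 1) := by
            rcases hstep 1 with h | h
            · simpa using h
            · exact absurd h one_ne_zero
          have h2 : aLoop xs (f+1) (c+1) j = aLoop xs f (c + 2) (j + 1) := by
            rcases hstep (c+1) with h | h
            · rw [h]; ring_nf
            · exfalso; omega
          set e1 := aLoop xs f 1 (j + 1) with he1
          have he1ge : j + 1 ≤ e1 := aLoop_mono xs f 1 (j+1)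
          have hm : ((xs.length : Int) - (j+1)).toNat < n := by omega
          have hA : aLoop xs f 2 (j + 1) = aLoop xs ((xs.length : Int) - e1).toNat 1 e1 := by
            have := ih _ hm (j+1) f 1 (le_refl _) (by omega) (by omega)
            simpa using this
          have hB : aLoop xs f (c + 2) (j + 1) = aLoop xs ((xs.length : Int) - e1).toNat (c+1) e1 := by
            have := ih _ hm (j+1) f (c+1) (le_refl _) (by omega) (by omega)
            rw [← he1] at this
            convert this using 2 <;> ring
          have hm2 : ((xs.length : Int) - e1).toNat < n := by omega
          have hC := ih _ hm2 e1 ((xs.length : Int) - e1).toNat c (le_refl _) (le_refl _) hc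
          rw [h2, hB, hC, h1, hA]
        · -- other token (or out-of-range negative j): depth unchanged, advance
          have hs : ∀ (d : Int), d ≠ 0 → aLoop xs (f+1) d j = aLoop xs f d (j + 1) := by
            intro d hd
            simp only [aLoop, if_pos (show d ≠ 0 ∧ j < (xs.length:Int) from ⟨hd, hj⟩), hcl, hopen]
            norm_num
          rw [hs (c+1) (by omega), hs 1 one_ne_zero]
          exact ih (n-1) (by omega) (j+1) f c (by omega) (by omega) hc
    · have he : aLoop xs fA 1 j = j := aLoop_exit xs fA 1 j (by omega)
      rw [he, aLoop_exit xs fA (c+1) j (by omega), aLoop_exit xs _ c j (by omega)]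

-- B's recursion always makes progress.
theorem b_mono (xs : List String) (f : Nat) :
    (∀ i, 1 ≤ bCount xs f i) ∧ (∀ p, p ≤ bLoop xs f p) := by
  induction f with
  | zero => constructor <;> intro x <;> simp [bCount, bLoop]
  | succ f ih =>
    constructor
    · intro i
      by_cases h : PySem.List.pyGet? xs i ≠ some "("
      · simp [bCount, h]
      · have hl := ih.2 (i + 1)
        simp only [bCount, if_neg h]
        split <;> omega
    · intro p
      by_cases h : p < (xs.length : Int) ∧ PySem.List.pyGet? xs p ≠ some ")"
      · have hc := ih.1 p
        have hl := ih.2 (p + bCount xs f p)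
        simp only [bLoop, if_pos h]
        omega
      · simp [bLoop, h]

-- The heart: A's depth-1 scan from p equals B's loop from p, shifted past the
-- closing ')' when one was found.
theorem main_lemma (xs : List String) (n : Nat) : ∀ (p : Int) (fA fB : Nat),
    ((xs.length : Int) - p).toNat ≤ n →
    ((xs.length : Int) - p).toNat ≤ fA →
    2 * ((xs.length : Int) - p).toNat + 2 ≤ fB →
    aLoop xs fA 1 p =
      (if bLoop xs fB p < (xs.length : Int) then bLoop xs fB p + 1 else bLoop xs fB p) := by
  induction n using Nat.strong_induction_on with
  | _ n ih =>
    intro p fA fB hn hfA hfB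
    rcases fB with _ | fB
    · exfalso; omega
    by_cases hp : p < (xs.length : Int)
    · rcases fA with _ | fA
      · exfalso; omega
      by_cases hcl : PySem.List.pyGet? xs p = some ")"
      · -- close at this level: B stops at p, A consumes it and exits
        have hB : bLoop xs (fB+1) p = p := by
          simp [bLoop, hcl]
        have hop : ¬ PySem.List.pyGet? xs p = some "(" := by
          rw [hcl]; intro h; simp at h
        have hA : aLoop xs (fA+1) 1 p = p + 1 := by
          simp only [aLoop, if_pos (show (1:Int) ≠ 0 ∧ p < (xs.length:Int) from ⟨one_ne_zero, hp⟩)]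
          simp only [if_pos hcl, if_neg hop]
          exact aLoop_exit xs fA (1-1) (p+1) (by omega)
        rw [hA, hB, if_pos hp]
      · have hguard : p < (xs.length : Int) ∧ PySem.List.pyGet? xs p ≠ some ")" := ⟨hp, hcl⟩
        have hBstep : bLoop xs (fB+1) p = bLoop xs fB (p + bCount xs fB p) := by
          simp only [bLoop, if_pos hguard]
        by_cases hopen : PySem.List.pyGet? xs p = some "("
        · -- nested subexpression
          rcases fB with _ | fB'
          · exfalso; omega
          have hCstep : bCount xs (fB'+1) p =
              (if bLoop xs fB' (p+1) < (xs.length : Int)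
               then bLoop xs fB' (p+1) + 1 - p else bLoop xs fB' (p+1) - p) := by
            simp only [bCount, if_neg (show ¬ PySem.List.pyGet? xs p ≠ some "(" by simpa using hopen)]
          set e := bLoop xs fB' (p+1) with hedef
          have hege : p + 1 ≤ e := (b_mono xs fB').2 (p+1)
          -- A takes one step to depth 2
          have hA1 : aLoop xs (fA+1) 1 p = aLoop xs fA 2 (p+1) := by
            simp only [aLoop, if_pos (show (1:Int) ≠ 0 ∧ p < (xs.length:Int) from ⟨one_ne_zero, hp⟩)]
            simp only [if_neg hcl, if_pos hopen]
            norm_num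
          -- compose: depth-2 from p+1 = depth-1 to e', then depth-1 from e'
          have hcomp := aLoop_compose xs (((xs.length : Int) - (p+1)).toNat) (p+1) fA 1 (le_refl _) (by omega) (le_refl _)
          -- the inner depth-1 scan equals B's transformed inner loop value
          have hinner : aLoop xs fA 1 (p+1) = (if e < (xs.length : Int) then e + 1 else e) := by
            exact ih (((xs.length : Int) - (p+1)).toNat) (by omega) (p+1) fA fB' (le_refl _) (by omega) (by omega)
          set p' := (if e < (xs.length : Int) then e + 1 else e) with hp'def
          have hp'ge : p + 1 ≤ p' := by rw [hp'def]; split <;> omega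
          -- B's loop continues from p' with fuel fB'+1
          have hp'eq : p + bCount xs (fB'+1) p = p' := by
            rw [hCstep, hp'def]; split <;> ring
          -- outer continuation: IH at p'
          have houter := ih (((xs.length : Int) - p').toNat) (by omega) p'
              (((xs.length : Int) - p').toNat) (fB'+1) (le_refl _) (le_refl _) (by omega)
          rw [hA1, show (2:Int) = 1 + 1 from rfl, hcomp, hinner, hBstep, hp'eq, ← houter]
        · -- ordinary token (or out-of-range negative p): both advance by one
          have hA1 : aLoop xs (fA+1) 1 p = aLoop xs fA 1 (p+1) := by
            simp only [aLoop, if_pos (show (1:Int) ≠ 0 ∧ p < (xs.length:Int) from ⟨one_ne_zero, hp⟩)]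
            simp only [if_neg hcl, if_neg hopen]
          have hC1 : bCount xs fB p = 1 := by
            rcases fB with _ | fB'
            · simp [bCount]
            · simp [bCount, hopen]
          rw [hA1, hBstep, hC1]
          exact ih (n-1) (by omega) (p+1) fA fB (by omega) (by omega) (by omega)
    · have hA : aLoop xs fA 1 p = p := aLoop_exit xs fA 1 p (by omega)
      have hB : bLoop xs (fB+1) p = p := by
        simp only [bLoop, if_neg (show ¬ (p < (xs.length : Int) ∧ PySem.List.pyGet? xs p ≠ some ")") from fun h => hp h.1)]
      rw [hA, hB, if_neg hp]

-- ===== VERDICT (by name: the statement is the Claim_ definition above) =====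
theorem count_subexpr_length_spec : Claim_equal_count_subexpr_length := by
  intro xs i _ hpre
  unfold Spec_count_subexpr_length count_subexpr_length count_subexpr_length_alt
  have hin : -(xs.length : Int) ≤ i ∧ i < (xs.length : Int) := by
    have := hpre
    unfold Pre_count_subexpr_length PySem.Raise.InRange at this
    omega
  have hsome : ∃ t, PySem.List.pyGet? xs i = some t := by
    rcases h : PySem.List.pyGet? xs i with _ | t
    · exfalso
      rw [PySem.List.pyGet?_eq_none_iff] at h
      exact h (by unfold PySem.Raise.InRange; omega)
    · exact ⟨t, rfl⟩
  rcases hsome with ⟨t, ht⟩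
  rw [ht]
  rw [show (match some t with
      | none => (0:Int)
      | some t => if t = "(" then aLoop xs ((xs.length:Int) - (i + 1)).toNat 1 (i + 1) - i else i + 1 - i)
      = (if t = "(" then aLoop xs ((xs.length:Int) - (i + 1)).toNat 1 (i + 1) - i else i + 1 - i) from rfl]
  by_cases hto : t = "("
  · subst hto
    have hL1 : 1 ≤ xs.length := by omega
    have hBstep : bCount xs (4 * xs.length + 2) i =
        (if bLoop xs (4 * xs.length + 1) (i+1) < (xs.length : Int)
         then bLoop xs (4 * xs.length + 1) (i+1) + 1 - i
         else bLoop xs (4 * xs.length + 1) (i+1) - i) := by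
      simp only [show 4 * xs.length + 2 = (4 * xs.length + 1) + 1 from rfl, bCount]
      rw [if_neg (show ¬ PySem.List.pyGet? xs i ≠ some "(" by simpa using ht)]
    have hmain := main_lemma xs (((xs.length : Int) - (i+1)).toNat) (i+1)
        (((xs.length : Int) - (i+1)).toNat) (4 * xs.length + 1) (le_refl _) (le_refl _) (by omega)
    rw [if_pos rfl, hBstep, hmain]
    split <;> ring
  · rw [if_neg hto]
    have hBone : bCount xs (4 * xs.length + 2) i = 1 := by
      simp only [show 4 * xs.length + 2 = (4 * xs.length + 1) + 1 from rfl, bCount]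
      rw [if_pos (by rw [ht]; simpa using hto)]
    rw [hBone]; ring
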